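-- pv_equiv track=rewrite | github.com/tlancaster6/CichlidDetection | Modules/Plotters.py | _flip_mapping
-- ===== SOURCE A (Python) =====
-- def _flip_mapping(a_to_b, len_b):
--     if len_b == 0:
--         return []
--     else:
--         mapping = []
--         for i in range(len_b):
--             try:
--                 mapping.append(a_to_b.index(i))
--             except ValueError:
--                 mapping.append(None)
--         return mapping
-- ===== SOURCE B (Python) =====
-- def _flip_mapping(a_to_b, len_b):
--     # Single forward pass over the source: write each source index into its
--     # target slot, keeping the first write (= .index's first-occurrence rule).
--     result = [None] * max(len_b, 0)
--     for idx, val in enumerate(a_to_b):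
--         if 0 <= val < len_b and result[val] is None:
--             result[val] = idx
--     return result
-- ===== Notes on version B (the rewrite author's own statement) =====
-- stated objective: faster
-- what changed: Instead of looping over every target position and rescanning the source with list.index, B allocates the result once and makes a single forward pass over the source, writing each source index into its in-range target slot only if the slot is still empty (first-occurrence rule).
import Mathlib
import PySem

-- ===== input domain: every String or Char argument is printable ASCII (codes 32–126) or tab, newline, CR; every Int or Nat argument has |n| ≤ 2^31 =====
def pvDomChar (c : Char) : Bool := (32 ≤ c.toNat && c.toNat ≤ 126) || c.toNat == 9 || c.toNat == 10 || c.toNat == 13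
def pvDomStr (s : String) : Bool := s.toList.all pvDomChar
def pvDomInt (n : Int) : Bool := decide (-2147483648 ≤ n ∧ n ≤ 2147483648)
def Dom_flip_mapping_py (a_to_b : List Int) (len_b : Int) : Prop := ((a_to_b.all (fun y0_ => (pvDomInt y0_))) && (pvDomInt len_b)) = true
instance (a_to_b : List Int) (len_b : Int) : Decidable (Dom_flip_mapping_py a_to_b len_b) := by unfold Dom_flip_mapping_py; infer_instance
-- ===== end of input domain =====

-- B replaces A's per-target rescans with one allocation and a single forward pass over the source (asymptotically faster).


-- ===== PORT A =====
-- literal port of A: for i in range(len_b): append a_to_b.index(i) (or None on ValueError)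
def flip_mapping_py (a_to_b : List Int) (len_b : Int) : List (Option Int) :=
  if len_b = 0 then []
  else (PySem.List.pyRange 0 len_b 1).foldl
    (fun mapping i => mapping ++ [(PySem.List.index? a_to_b i).map (fun (k : Nat) => (k : Int))]) []

-- ===== PORT B =====
-- literal port of Source B: result = [None]*max(len_b,0); one pass over enumerate(a_to_b)
def flip_mapping_py_alt (a_to_b : List Int) (len_b : Int) : List (Option Int) :=
  (PySem.List.enumerate a_to_b 0).foldl
    (fun result p =>
      if 0 ≤ p.2 ∧ p.2 < len_b ∧ result.getD p.2.toNat none = none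
      then result.set p.2.toNat (some p.1) else result)
    (List.replicate (max len_b 0).toNat none)

-- ===== PRECONDITION & SPEC =====
def Spec_flip_mapping_py (a_to_b : List Int) (len_b : Int) (out : List (Option Int)) : Prop := out = flip_mapping_py_alt a_to_b len_b
instance (a_to_b : List Int) (len_b : Int) (out : List (Option Int)) : Decidable (Spec_flip_mapping_py a_to_b len_b out) := by unfold Spec_flip_mapping_py; infer_instance

-- ===== CLAIM (what is proved, stated in full; the proofs are below) =====
def Claim_equal_flip_mapping_py : Prop := ∀ (a_to_b : List Int) (len_b : Int), Dom_flip_mapping_py a_to_b len_b → Spec_flip_mapping_py a_to_b len_b (flip_mapping_py a_to_b len_b)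

-- ===== LEMMAS AND PROOFS =====

-- the common characterisation both ports are reduced to
def pvTarget (a_to_b : List Int) (len_b : Int) : List (Option Int) :=
  (List.range len_b.toNat).map (fun (j : Nat) => (PySem.List.index? a_to_b (j : Int)).map (fun (k : Nat) => (k : Int)))

lemma pvTarget_length (l : List Int) (len_b : Int) : (pvTarget l len_b).length = len_b.toNat := by
  simp [pvTarget]

lemma pvTarget_getElem (l : List Int) (len_b : Int) (j : Nat) (h : j < len_b.toNat) :
    (pvTarget l len_b)[j]'(by rw [pvTarget_length]; exact h)
      = (PySem.List.index? l (j : Int)).map (fun (k : Nat) => (k : Int)) := by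
  simp [pvTarget]

lemma index?_append_single_of_ne (pre : List Int) (v x : Int) (h : x ≠ v ∨ x ∈ pre) :
    PySem.List.index? (pre ++ [v]) x = PySem.List.index? pre x := by
  by_cases hm : x ∈ pre
  · exact PySem.List.index?_append_of_mem [v] hm
  · have hxv : x ≠ v := h.resolve_right hm
    rw [(PySem.List.index?_eq_none_iff pre x).mpr hm,
        (PySem.List.index?_eq_none_iff (pre ++ [v]) x).mpr]
    intro hmem
    rcases List.mem_append.mp hmem with h1 | h2
    · exact hm h1
    · exact hxv (List.mem_singleton.mp h2)

lemma a_eq_target (a_to_b : List Int) (len_b : Int) :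
    flip_mapping_py a_to_b len_b = pvTarget a_to_b len_b := by
  unfold flip_mapping_py
  by_cases h : len_b = 0
  · subst h; simp [pvTarget]
  · rw [if_neg h, PySem.List.foldl_append_singleton_eq_map, PySem.List.pyRange_one,
        List.map_map, List.nil_append]
    have h0 : (len_b - 0).toNat = len_b.toNat := by omega
    rw [h0]
    unfold pvTarget
    apply List.map_congr_left
    intro k _
    simp only [Function.comp, zero_add]

lemma b_eq_target (a_to_b : List Int) (len_b : Int) :
    flip_mapping_py_alt a_to_b len_b = pvTarget a_to_b len_b := by
  unfold flip_mapping_py_alt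
  have hmax : (max len_b 0).toNat = len_b.toNat := by omega
  rw [hmax]
  induction a_to_b using List.reverseRecOn with
  | nil =>
    unfold pvTarget
    rw [PySem.List.enumerate_nil, List.foldl_nil]
    apply List.ext_getElem
    · simp
    · intro j hj1 hj2
      simp [PySem.List.index?]
  | append_singleton pre v ih =>
    rw [PySem.List.enumerate_append, List.foldl_append, ih,
        PySem.List.enumerate_cons, PySem.List.enumerate_nil, List.foldl_cons, List.foldl_nil]
    by_cases hv : 0 ≤ v ∧ v < len_b
    · have hvn : v.toNat < len_b.toNat := by omega
      have hvcast : (v.toNat : Int) = v := by omega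
      have hgd : (pvTarget pre len_b).getD v.toNat none =
          (PySem.List.index? pre v).map (fun (k : Nat) => (k : Int)) := by
        rw [List.getD_eq_getElem?_getD,
            List.getElem?_eq_getElem (by rw [pvTarget_length]; exact hvn),
            pvTarget_getElem pre len_b v.toNat hvn, hvcast, Option.getD_some]
      by_cases hmem : v ∈ pre
      · -- slot already filled: condition false, index? unchanged by the append
        have hsome : (PySem.List.index? pre v).isSome :=
          (PySem.List.index?_isSome_iff pre v).mpr hmem
        have hcond : ¬ (0 ≤ v ∧ v < len_b ∧ (pvTarget pre len_b).getD v.toNat none = none) := by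
          rcases Option.isSome_iff_exists.mp hsome with ⟨k, hk⟩
          rw [hgd, hk]
          rintro ⟨-, -, hc⟩
          rw [Option.map_some] at hc
          exact Option.some_ne_none _ hc
        rw [if_neg hcond]
        unfold pvTarget
        apply List.map_congr_left
        intro j _
        rw [index?_append_single_of_ne]
        by_cases hjv : (j : Int) = v
        · right; rw [hjv]; exact hmem
        · left; exact hjv
      · -- empty slot: condition true, write the new index into the slot
        have hnone : PySem.List.index? pre v = none :=
          (PySem.List.index?_eq_none_iff pre v).mpr hmem
        have hcond : (0 ≤ v ∧ v < len_b ∧ (pvTarget pre len_b).getD v.toNat none = none) :=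
          ⟨hv.1, hv.2, by rw [hgd, hnone]; rfl⟩
        rw [if_pos hcond]
        apply List.ext_getElem
        · rw [List.length_set, pvTarget_length, pvTarget_length]
        · intro j hj1 hj2
          have hjn : j < len_b.toNat := by
            rw [List.length_set, pvTarget_length] at hj1; exact hj1
          rw [List.getElem_set, pvTarget_getElem (pre ++ [v]) len_b j hjn]
          by_cases hjv : v.toNat = j
          · have hcast : (j : Int) = v := by omega
            rw [if_pos hjv, hcast,
                PySem.List.index?_append_singleton_self pre v hmem]
            simp
          · have hne : (j : Int) ≠ v := by omega
            rw [if_neg hjv, pvTarget_getElem pre len_b j hjn,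
                index?_append_single_of_ne pre v _ (Or.inl hne)]
    · -- value out of range: nothing written, no range position equals v
      have hcond : ¬ (0 ≤ v ∧ v < len_b ∧ (pvTarget pre len_b).getD v.toNat none = none) := by
        tauto
      rw [if_neg hcond]
      unfold pvTarget
      apply List.map_congr_left
      intro j hj
      have hjn : j < len_b.toNat := List.mem_range.mp hj
      have hne : (j : Int) ≠ v := by omega
      rw [index?_append_single_of_ne pre v _ (Or.inl hne)]

-- ===== VERDICT (by name: the statement is the Claim_ definition above) =====
theorem flip_mapping_py_spec : Claim_equal_flip_mapping_py := by
  intro a_to_b len_b _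
  unfold Spec_flip_mapping_py
  rw [a_eq_target, b_eq_target]
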